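-- pv_equiv track=rewrite | github.com/juritox/advent-of-code | 2024/Day04/day_04_part_1_solution.py | get_all_primary_diagonal_lines
-- ===== SOURCE A (Python) =====
-- def get_all_horizontal_lines(puzzle: str) -> list[str]:
--     """
--     Split the puzzle input into horizontal lines.
--
--     Args:
--         puzzle (str): The complete puzzle input as a string.
--
--     Returns:
--         list[str]: A list of strings, each representing a horizontal line in the puzzle.
--     """
--     return puzzle.splitlines()
--
-- def get_all_primary_diagonal_lines(puzzle: str) -> list[str]:
--     """
--     Extract all primary (top-left to bottom-right) diagonal lines from the puzzle input.
--
--     Args: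
--         puzzle (str): The complete puzzle input as a string.
--
--     Returns:
--         list[str]: A list of strings, each representing a primary diagonal line in the puzzle.
--     """
--     rows = get_all_horizontal_lines(puzzle)
--
--     num_rows = len(rows)
--     num_cols = len(rows[0])
--     primary_diagonals = []
--
--     # Traverse diagonals starting from the first column of each row
--     for start_row in range(num_rows):
--         diagonal = []
--         row, col = start_row, 0
--         while row < num_rows and col < num_cols:
--             diagonal.append(rows[row][col])
--             row += 1
--             col += 1
--         primary_diagonals.append("".join(diagonal))
--
--     # Traverse diagonals starting from the first row of each column (except the first column)
--     for start_col in range(1, num_cols):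
--         diagonal = []
--         row, col = 0, start_col
--         while row < num_rows and col < num_cols:
--             diagonal.append(rows[row][col])
--             row += 1
--             col += 1
--         primary_diagonals.append("".join(diagonal))
--
--     return primary_diagonals
-- ===== SOURCE B (Python) =====
-- def get_all_primary_diagonal_lines(puzzle: str) -> list[str]:
--     """Single row-major pass bucketing characters by diagonal key col - row,
--     then emitting buckets in the original offset order."""
--     rows = puzzle.splitlines()
--     num_rows = len(rows)
--     num_cols = len(rows[0])
--     buckets = {}
--     for row in range(num_rows):
--         for col in range(num_cols):
--             buckets.setdefault(col - row, []).append(rows[row][col])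
--     diagonals = ["".join(buckets.get(-start_row, [])) for start_row in range(num_rows)]
--     diagonals += ["".join(buckets.get(start_col, [])) for start_col in range(1, num_cols)]
--     return diagonals
-- ===== Notes on version B (the rewrite author's own statement) =====
-- stated objective: alternative
-- what changed: Replaces the per-diagonal while-loop scans (one walk per start cell) by a single row-major pass that buckets every character into a dict keyed by col - row, then emits the buckets in the original offset order.
import Mathlib
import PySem

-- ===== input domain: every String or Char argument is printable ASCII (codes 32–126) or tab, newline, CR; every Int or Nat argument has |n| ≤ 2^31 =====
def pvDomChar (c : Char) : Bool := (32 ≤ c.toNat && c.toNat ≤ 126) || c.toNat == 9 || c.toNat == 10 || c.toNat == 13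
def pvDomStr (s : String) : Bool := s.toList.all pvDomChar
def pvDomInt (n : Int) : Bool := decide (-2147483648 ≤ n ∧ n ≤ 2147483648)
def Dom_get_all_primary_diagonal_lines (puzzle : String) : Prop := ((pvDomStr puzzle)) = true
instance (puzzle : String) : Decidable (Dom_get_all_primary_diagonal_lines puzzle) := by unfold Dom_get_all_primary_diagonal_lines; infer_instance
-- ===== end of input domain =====

-- B replaces A's one-walk-per-diagonal while loops by a single row-major pass that buckets
-- each character into a dict keyed by col - row (objective: alternative decomposition, same cost).

-- ===== PORT A =====
-- A's inner while loop: walk one diagonal from (row, col), stepping row+1, col+1.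
-- (rows is handled as List (List Char); indexing is in range on Pre_, so getD is exact there.)
def pvDiagA (rows : List (List Char)) (numRows numCols : Nat) (row col : Nat) : List Char :=
  if _h : row < numRows ∧ col < numCols then
    ((rows.getD row []).getD col ' ') :: pvDiagA rows numRows numCols (row + 1) (col + 1)
  else []
termination_by numRows - row

def get_all_primary_diagonal_lines (puzzle : String) : List String :=
  let rows := (PySem.Str.splitlines puzzle).map String.toList
  let numRows := rows.length
  let numCols := (rows.getD 0 []).length
  ((List.range numRows).map (fun startRow => String.ofList (pvDiagA rows numRows numCols startRow 0)))
    ++ ((List.range' 1 (numCols - 1)).map (fun startCol => String.ofList (pvDiagA rows numRows numCols 0 startCol)))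

-- ===== PORT B =====
-- Source B: buckets.setdefault(col - row, []).append(rows[row][col]) is Dict.modify key [] (· ++ [c]).
def get_all_primary_diagonal_lines_alt (puzzle : String) : List String :=
  let rows := (PySem.Str.splitlines puzzle).map String.toList
  let numRows := rows.length
  let numCols := (rows.getD 0 []).length
  let buckets : PySem.Dict Int (List Char) :=
    (List.range numRows).foldl (fun d (row : Nat) =>
      (List.range numCols).foldl (fun d (col : Nat) =>
        d.modify ((col : Int) - (row : Int)) [] (· ++ [(rows.getD row []).getD col ' '])) d)
      PySem.Dict.empty
  ((List.range numRows).map (fun (startRow : Nat) => String.ofList (buckets.getD (-(startRow : Int)) [])))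
    ++ ((List.range' 1 (numCols - 1)).map (fun (startCol : Nat) => String.ofList (buckets.getD ((startCol : Int)) [])))

-- ===== PRECONDITION & SPEC =====
-- Pre_ excludes exactly the inputs where the Python A raises IndexError: an empty line list
-- (rows[0]) and ragged grids with a line shorter than the first (rows[row][col]).
def Pre_get_all_primary_diagonal_lines (puzzle : String) : Prop :=
  PySem.Str.splitlines puzzle ≠ [] ∧
    ∀ r ∈ PySem.Str.splitlines puzzle,
      ((PySem.Str.splitlines puzzle).getD 0 "").toList.length ≤ r.toList.length
instance (puzzle : String) : Decidable (Pre_get_all_primary_diagonal_lines puzzle) := by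
  unfold Pre_get_all_primary_diagonal_lines; infer_instance

def pvWitness_get_all_primary_diagonal_lines : String := "ab\ncd"

def Spec_get_all_primary_diagonal_lines (puzzle : String) (out : List String) : Prop := out = get_all_primary_diagonal_lines_alt puzzle
instance (puzzle : String) (out : List String) : Decidable (Spec_get_all_primary_diagonal_lines puzzle out) := by unfold Spec_get_all_primary_diagonal_lines; infer_instance

-- ===== CLAIM (what is proved, stated in full; the proofs are below) =====
def Claim_equal_get_all_primary_diagonal_lines : Prop := ∀ (puzzle : String), Dom_get_all_primary_diagonal_lines puzzle → Pre_get_all_primary_diagonal_lines puzzle → Spec_get_all_primary_diagonal_lines puzzle (get_all_primary_diagonal_lines puzzle)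

-- ===== LEMMAS AND PROOFS =====
-- The diagonal with key k = col - row, read off row by row (the common characterisation).
def pvF (rows : List (List Char)) (numCols : Nat) (k : Int) (r : Nat) : List Char :=
  if 0 ≤ k + (r : Int) ∧ k + (r : Int) < (numCols : Int) then
    [(rows.getD r []).getD (k + (r : Int)).toNat ' ']
  else []

def pvDiagSpec (rows : List (List Char)) (numRows numCols : Nat) (k : Int) : List Char :=
  (List.range numRows).flatMap (pvF rows numCols k)

lemma pvDiagA_eq_flatMap (rows : List (List Char)) (numRows numCols : Nat) :
    ∀ (n row col : Nat), n = numRows - row →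
      pvDiagA rows numRows numCols row col
        = (List.range' row n).flatMap (pvF rows numCols ((col : Int) - (row : Int))) := by
  intro n
  induction n with
  | zero =>
    intro row col h
    rw [pvDiagA]
    have : ¬ (row < numRows ∧ col < numCols) := by omega
    simp [this]
  | succ m ih =>
    intro row col h
    have hrow : row < numRows := by omega
    rw [pvDiagA, List.range'_succ, List.flatMap_cons]
    have hk : ((col : Int) - (row : Int)) + (row : Int) = (col : Int) := by ring
    by_cases hc : col < numCols
    · simp only [hrow, hc, and_self, dite_true]
      have hcond : (0 : Int) ≤ ((col : Int) - (row : Int)) + (row : Int) ∧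
          ((col : Int) - (row : Int)) + (row : Int) < (numCols : Int) := by
        rw [hk]; exact ⟨Int.natCast_nonneg col, by exact_mod_cast hc⟩
      have hrec := ih (row + 1) (col + 1) (by omega)
      have hkk : ((col + 1 : Nat) : Int) - ((row + 1 : Nat) : Int) = (col : Int) - (row : Int) := by
        push_cast; ring
      rw [hrec, hkk]
      have hone : pvF rows numCols ((col : Int) - (row : Int)) row
          = [(rows.getD row []).getD col ' '] := by
        simp only [pvF, hk]
        rw [if_pos ⟨Int.natCast_nonneg col, by exact_mod_cast hc⟩]
        simp
      rw [hone]
      rfl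
    · have : ¬ (row < numRows ∧ col < numCols) := by tauto
      simp only [this, dite_false]
      have h1 : pvF rows numCols ((col : Int) - (row : Int)) row = [] := by
        simp only [pvF, hk, ite_eq_right_iff]
        intro hx
        exact absurd (by exact_mod_cast hx.2) hc
      have h2 : (List.range' (row + 1) m).flatMap (pvF rows numCols ((col : Int) - (row : Int))) = [] := by
        rw [List.flatMap_eq_nil_iff]
        intro x hx
        rw [List.mem_range'_1] at hx
        simp only [pvF, ite_eq_right_iff]
        intro hcond
        have : (col : Int) ≤ ((col : Int) - (row : Int)) + (x : Int) := by
          have : (row : Int) ≤ (x : Int) := by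
            exact_mod_cast Nat.le_of_succ_le hx.1
          omega
        have : (col : Int) < (numCols : Int) := by omega
        exact absurd (by exact_mod_cast this) hc
      rw [h1, h2]; rfl

-- A's first loop: the diagonal starting at (startRow, 0) is the k = -startRow bucket.
lemma pvDiagA_first (rows : List (List Char)) (numRows numCols : Nat)
    (startRow : Nat) (h : startRow < numRows) :
    pvDiagA rows numRows numCols startRow 0
      = pvDiagSpec rows numRows numCols (-(startRow : Int)) := by
  have hmain := pvDiagA_eq_flatMap rows numRows numCols (numRows - startRow) startRow 0 rfl
  have hk : ((0 : Nat) : Int) - (startRow : Int) = -(startRow : Int) := by push_cast; ring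
  rw [hmain, hk]
  unfold pvDiagSpec
  rw [List.range_eq_range']
  have hn : startRow + (numRows - startRow) = numRows := by omega
  have hsplit : List.range' 0 numRows
      = List.range' 0 startRow ++ List.range' startRow (numRows - startRow) := by
    rw [← hn, ← List.range'_append_1]
    simp
  rw [hsplit, List.flatMap_append]
  have hpre : (List.range' 0 startRow).flatMap (pvF rows numCols (-(startRow : Int))) = [] := by
    rw [List.flatMap_eq_nil_iff]
    intro x hx
    rw [List.mem_range'_1] at hx
    simp only [pvF, ite_eq_right_iff]
    intro hcond
    have : (x : Int) < (startRow : Int) := by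
      exact_mod_cast (show x < startRow by omega)
    omega
  rw [hpre, List.nil_append]

-- A's second loop: the diagonal starting at (0, startCol) is the k = startCol bucket.
lemma pvDiagA_second (rows : List (List Char)) (numRows numCols : Nat) (startCol : Nat) :
    pvDiagA rows numRows numCols 0 startCol
      = pvDiagSpec rows numRows numCols (startCol : Int) := by
  have hmain := pvDiagA_eq_flatMap rows numRows numCols numRows 0 startCol (by omega)
  have hk : (startCol : Int) - ((0 : Nat) : Int) = (startCol : Int) := by push_cast; ring
  rw [hmain, hk]
  unfold pvDiagSpec
  rw [List.range_eq_range']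

-- The range of columns hit by a fixed row in bucket k: at most one.
lemma pvRangeFilter (numCols row : Nat) (k : Int) :
    (List.range numCols).filter (fun (col : Nat) => ((col : Int) - (row : Int) == k))
      = if 0 ≤ k + (row : Int) ∧ k + (row : Int) < (numCols : Int) then [(k + (row : Int)).toNat] else [] := by
  induction numCols with
  | zero => simp
  | succ m ih =>
    rw [List.range_succ, List.filter_append, ih]
    by_cases hc : ((m : Int) - (row : Int) = k)
    · have h1 : (0 : Int) ≤ k + (row : Int) ∧ k + (row : Int) < ((m + 1 : Nat) : Int) := by
        push_cast; omega
      have h0 : ¬ ((0 : Int) ≤ k + (row : Int) ∧ k + (row : Int) < (m : Int)) := by omega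
      have ht : (k + (row : Int)).toNat = m := by omega
      simp [hc, h1, ht]
      rw [if_neg (by omega), if_pos (by omega)]
      simp
    · have hiff : ((0 : Int) ≤ k + (row : Int) ∧ k + (row : Int) < ((m + 1 : Nat) : Int))
          ↔ ((0 : Int) ≤ k + (row : Int) ∧ k + (row : Int) < (m : Int)) := by
        push_cast; omega
      simp [hc]
      have heq : ((0 : Int) ≤ k + (row : Int) ∧ k + (row : Int) < (m : Int))
          ↔ ((0 : Int) ≤ k + (row : Int) ∧ k + (row : Int) ≤ (m : Int)) := by omega
      simp only [heq]

-- B's bucket for key k is exactly pvDiagSpec k.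
lemma pvBuckets_getD (rows : List (List Char)) (numRows numCols : Nat) (k : Int) :
    (((List.range numRows).foldl (fun d (row : Nat) =>
        (List.range numCols).foldl (fun d (col : Nat) =>
          d.modify ((col : Int) - (row : Int)) [] (· ++ [(rows.getD row []).getD col ' '])) d)
        PySem.Dict.empty).getD k [])
      = pvDiagSpec rows numRows numCols k := by
  have hshape : ∀ (d : PySem.Dict Int (List Char)),
      (List.range numRows).foldl (fun d row =>
        (List.range numCols).foldl (fun d col =>
          d.modify ((col : Int) - (row : Int)) [] (· ++ [(rows.getD row []).getD col ' '])) d) d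
      = ((List.range numRows).flatMap (fun (row : Nat) => (List.range numCols).map
            (fun (col : Nat) => (((col : Int) - (row : Int)), (rows.getD row []).getD col ' ')))).foldl
          (fun d p => d.modify p.1 [] (· ++ [p.2])) d := by
    intro d
    rw [List.foldl_flatMap]
    congr 1
    funext d' row
    rw [List.foldl_map]
  rw [hshape, PySem.Dict.getD_foldl_modify_append]
  have hempty : (PySem.Dict.empty : PySem.Dict Int (List Char)).getD k [] = [] := by
    simp [pysem]
  rw [hempty, List.nil_append, List.filter_flatMap]
  unfold pvDiagSpec
  rw [List.map_flatMap]
  congr 1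
  funext row
  rw [List.filter_map, List.map_map]
  have hpred : ((fun (p : Int × Char) => p.1 == k) ∘ fun (col : Nat) =>
      (((col : Int) - (row : Int)), (rows.getD row []).getD col ' '))
      = fun (col : Nat) => ((col : Int) - (row : Int) == k) := rfl
  rw [hpred, pvRangeFilter]
  by_cases hc : (0 : Int) ≤ k + (row : Int) ∧ k + (row : Int) < (numCols : Int)
  · simp [pvF, hc]
  · simp [pvF, hc]

-- ===== VERDICT (by name: the statement is the Claim_ definition above) =====
theorem get_all_primary_diagonal_lines_spec : Claim_equal_get_all_primary_diagonal_lines := by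
  intro puzzle _hdom _hpre
  unfold Spec_get_all_primary_diagonal_lines
  simp only [get_all_primary_diagonal_lines, get_all_primary_diagonal_lines_alt]
  congr 1
  · apply List.map_congr_left
    intro startRow hmem
    rw [List.mem_range] at hmem
    rw [pvDiagA_first _ _ _ _ hmem, pvBuckets_getD]
  · apply List.map_congr_left
    intro startCol _hmem
    rw [pvDiagA_second, pvBuckets_getD]
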